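-- pv_equiv track=rewrite | github.com/nguyentieuat/ai-korean-study-partner | ai-korean-be/mfa_service/train_w2v2/ko_num_unit_verbalizer.py | _sino_any
-- ===== SOURCE A (Python) =====
-- _SINO_DIGITS = ["영","일","이","삼","사","오","육","칠","팔","구"]
--
-- _SINO_SMALL = [(1000,"천"),(100,"백"),(10,"십")]
--
-- _SINO_BIG   = [(10**12,"조"),(10**8,"억"),(10**4,"만")]
--
-- def _sino_int(n: int) -> str:
--     """Read non-negative integer in Sino-Korean (e.g., 123 -> 백 이십 삼)."""
--     if n == 0:
--         return "영"
--     out = []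
--     def _chunk_to_sino(x: int) -> str:
--         if x == 0:
--             return ""
--         parts = []
--         for val, name in _SINO_SMALL:
--             q, x = divmod(x, val)
--             if q:
--                 parts.append(name if q == 1 else _SINO_DIGITS[q] + " " + name)
--         if x:
--             parts.append(_SINO_DIGITS[x])
--         return " ".join(parts).strip()
--     for val, name in _SINO_BIG:
--         q, n = divmod(n, val)
--         if q:
--             out.append((_chunk_to_sino(q) + " " + name).strip())
--     if n:
--         out.append(_chunk_to_sino(n))
--     return " ".join(out).strip()
--
-- def _sino_any(num_str: str) -> str:
--     """Read an integer or decimal (with dot) in Sino-Korean."""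
--     s = num_str.replace(",", "")
--     if s.startswith("."):
--         s = "0" + s
--     if "." in s:
--         a, b = s.split(".", 1)
--         a_read = _sino_int(int(a)) if a else "영"
--         b_read = " ".join(_SINO_DIGITS[int(ch)] for ch in b if ch.isdigit())
--         return f"{a_read} 점 {b_read}".strip()
--     return _sino_int(int(s))
-- ===== SOURCE B (Python) =====
-- _SINO_DIGITS = ["영","일","이","삼","사","오","육","칠","팔","구"]
--
-- _SINO_SMALL_NAMES = ["", "십", "백", "천"]
--
-- _SINO_BIG_NAMES = ["", "만", "억", "조"]
--
-- def _sino_int_tokens(n: int) -> list: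
--     """Tokens of the Sino-Korean reading of non-negative n, peeling digits right to left."""
--     if n < 0:
--         raise ValueError("negative number")
--     if n == 0:
--         return ["영"]
--     toks = []
--     g = 0
--     while n:
--         grp = []
--         for p in _SINO_SMALL_NAMES:
--             n, d = divmod(n, 10)
--             if d == 1 and p:
--                 grp.append(p)
--             elif d:
--                 grp.append(_SINO_DIGITS[d] + (" " + p if p else ""))
--         grp.reverse()
--         if grp:
--             if g:
--                 grp.append(_SINO_BIG_NAMES[g])
--             toks = grp + toks
--         g += 1
--     return toks
--
-- def _sino_any(num_str: str) -> str:
--     """Read an integer or decimal (with dot) in Sino-Korean."""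
--     s = num_str.replace(",", "")
--     if s.startswith("."):
--         s = "0" + s
--     if "." in s:
--         a, b = s.split(".", 1)
--         toks = _sino_int_tokens(int(a)) if a else ["영"]
--         toks.append("점")
--         toks += [_SINO_DIGITS[int(ch)] for ch in b if ch.isdigit()]
--         return " ".join(toks)
--     return " ".join(_sino_int_tokens(int(s)))
-- ===== Notes on version B (the rewrite author's own statement) =====
-- stated objective: alternative
-- what changed: The integer reader is rewritten from A's two-level scheme (three big divmods, each chunk rendered by a nested helper into an intermediate string that is joined and re-stripped) into a single right-to-left digit-peeling loop that emits reading tokens into one flat list, space-joined once at the end, with no intermediate string assembly or strip calls.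
-- outside the precondition, e.g. on _sino_any('-10000000000000000'): A returns '영 천 조', B raises ValueError; on _sino_any('-1000000000000'): A returns '구 천 구 백 구 십 구 조', B raises ValueError
import Mathlib
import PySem

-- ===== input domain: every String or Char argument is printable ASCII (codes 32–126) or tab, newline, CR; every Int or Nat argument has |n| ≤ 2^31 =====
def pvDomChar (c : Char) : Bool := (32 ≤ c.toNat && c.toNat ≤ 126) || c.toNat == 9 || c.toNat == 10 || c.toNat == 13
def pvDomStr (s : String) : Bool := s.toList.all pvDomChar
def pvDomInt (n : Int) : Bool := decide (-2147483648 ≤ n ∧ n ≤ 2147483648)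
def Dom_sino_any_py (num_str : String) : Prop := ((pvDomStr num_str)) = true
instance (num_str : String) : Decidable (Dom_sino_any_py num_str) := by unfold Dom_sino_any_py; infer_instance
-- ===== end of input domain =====

-- B replaces A's two-level chunk-string construction (big divmods + nested chunk helper with
-- intermediate join/strip) by one right-to-left digit-peeling pass collecting flat reading
-- tokens, joined once (objective: alternative decomposition, same asymptotic cost).


-- ===== PORT A =====
-- _SINO_DIGITS / _SINO_SMALL / _SINO_BIG
def pvDigits : List String := ["영","일","이","삼","사","오","육","칠","팔","구"]
def pvSinoSmall : List (Int × String) := [(1000,"천"),(100,"백"),(10,"십")]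
def pvSinoBig : List (Int × String) := [(10^12,"조"),(10^8,"억"),(10^4,"만")]

-- _chunk_to_sino (list indexing _SINO_DIGITS[q] is pyGetD: under Pre_ every index is in 0..9)
def chunkToSino (x : Int) : String :=
  if x == 0 then "" else
  let st := pvSinoSmall.foldl (fun (st : List String × Int) vn =>
      let q := PySem.Int.floordiv st.2 vn.1
      let r := PySem.Int.mod st.2 vn.1
      (if q ≠ 0 then st.1 ++ [if q == 1 then vn.2 else PySem.List.pyGetD pvDigits q "" ++ " " ++ vn.2] else st.1, r))
    ([], x)
  let parts := if st.2 ≠ 0 then st.1 ++ [PySem.List.pyGetD pvDigits st.2 ""] else st.1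
  PySem.Str.strip (PySem.Str.join " " parts)

-- _sino_int
def sinoInt (n : Int) : String :=
  if n == 0 then "영" else
  let st := pvSinoBig.foldl (fun (st : List String × Int) vn =>
      let q := PySem.Int.floordiv st.2 vn.1
      let r := PySem.Int.mod st.2 vn.1
      (if q ≠ 0 then st.1 ++ [PySem.Str.strip (chunkToSino q ++ " " ++ vn.2)] else st.1, r))
    ([], n)
  let out := if st.2 ≠ 0 then st.1 ++ [chunkToSino st.2] else st.1
  PySem.Str.strip (PySem.Str.join " " out)

-- _sino_any; 'a, b = s.split(".", 1)' is read off the split list ("." ∈ s gives ≥ 2 parts)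
def sino_any_py (num_str : String) : String :=
  let s := PySem.Str.replace num_str "," ""
  let s := if PySem.Str.startswith s "." then "0" ++ s else s
  if PySem.Str.isIn "." s then
    let parts := (PySem.Str.splitMax? s "." 1).getD []
    let a := parts.headD ""
    let b := (parts.drop 1).headD ""
    let aRead := if a ≠ "" then sinoInt ((PySem.Int.ofStr? a).getD 0) else "영"
    let bRead := PySem.Str.join " "
      ((b.toList.filter PySem.Str.isdigit).map (fun ch =>
        PySem.List.pyGetD pvDigits ((PySem.Int.ofChars? [ch]).getD 0) ""))
    PySem.Str.strip (aRead ++ " 점 " ++ bRead)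
  else sinoInt ((PySem.Int.ofStr? s).getD 0)

-- ===== PORT B =====
def pvSmallNames : List String := ["", "십", "백", "천"]
def pvBigNames : List String := ["", "만", "억", "조"]

-- one step of B's inner 'for p in _SINO_SMALL_NAMES' loop
def pvGroupStep (st : Int × List String) (p : String) : Int × List String :=
  let d := PySem.Int.mod st.1 10
  let n := PySem.Int.floordiv st.1 10
  if d == 1 && p != "" then (n, st.2 ++ [p])
  else if d != 0 then (n, st.2 ++ [PySem.List.pyGetD pvDigits d "" ++ (if p != "" then " " ++ p else "")])
  else (n, st.2)

-- B's 'while n:' loop; fuel makes it total (17 > any group count reachable under Pre_)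
def pvGrpLoop (fuel : Nat) (n : Int) (g : Nat) (toks : List String) : List String :=
  match fuel with
  | 0 => toks
  | fuel+1 =>
    if n == 0 then toks else
    let st := pvSmallNames.foldl pvGroupStep (n, [])
    let grp := st.2.reverse
    let toks' := if grp ≠ [] then
        (if g ≠ 0 then grp ++ [PySem.List.pyGetD pvBigNames (g : Int) ""] else grp) ++ toks
      else toks
    pvGrpLoop fuel st.1 (g+1) toks'

-- _sino_int_tokens ('raise ValueError' on n < 0 is unreachable under Pre_)
def sinoIntTokens (n : Int) : List String :=
  if n < 0 then []
  else if n == 0 then ["영"]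
  else pvGrpLoop 17 n 0 []

def sino_any_py_alt (num_str : String) : String :=
  let s := PySem.Str.replace num_str "," ""
  let s := if PySem.Str.startswith s "." then "0" ++ s else s
  if PySem.Str.isIn "." s then
    let parts := (PySem.Str.splitMax? s "." 1).getD []
    let a := parts.headD ""
    let b := (parts.drop 1).headD ""
    let toks := (if a ≠ "" then sinoIntTokens ((PySem.Int.ofStr? a).getD 0) else ["영"])
        ++ ["점"]
        ++ (b.toList.filter PySem.Str.isdigit).map (fun ch =>
             PySem.List.pyGetD pvDigits ((PySem.Int.ofChars? [ch]).getD 0) "")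
    PySem.Str.join " " toks
  else PySem.Str.join " " (sinoIntTokens ((PySem.Int.ofStr? s).getD 0))

-- ===== PRECONDITION & SPEC =====
-- Pre_ admits exactly the inputs whose integer part parses per int() to a value in [0, 10^16):
-- on unparseable strings A raises ValueError, at ≥ 10^16 A raises IndexError; on a NEGATIVE
-- integer part A returns a nonsense reading produced by Python's negative-index wraparound
-- into _SINO_DIGITS, and B's digit loop instead raises ValueError there, so Pre_ excludes it.
def Pre_sino_any_py (num_str : String) : Prop :=
  let s := PySem.Str.replace num_str "," ""
  let s' := if PySem.Str.startswith s "." then "0" ++ s else s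
  (PySem.Str.isIn "." s' = true →
    (let a := ((PySem.Str.splitMax? s' "." 1).getD []).headD ""
     a = "" ∨ ((PySem.Int.ofStr? a).isSome = true ∧ 0 ≤ (PySem.Int.ofStr? a).getD 0 ∧
               (PySem.Int.ofStr? a).getD 0 < 10^16))) ∧
  (PySem.Str.isIn "." s' = false →
    ((PySem.Int.ofStr? s').isSome = true ∧ 0 ≤ (PySem.Int.ofStr? s').getD 0 ∧
     (PySem.Int.ofStr? s').getD 0 < 10^16))
instance (num_str : String) : Decidable (Pre_sino_any_py num_str) := by
  unfold Pre_sino_any_py; infer_instance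

def pvWitness_sino_any_py : String := "1,234.56"

def Spec_sino_any_py (num_str : String) (out : String) : Prop := out = sino_any_py_alt num_str
instance (num_str : String) (out : String) : Decidable (Spec_sino_any_py num_str out) := by
  unfold Spec_sino_any_py; infer_instance

-- ===== CLAIM (what is proved, stated in full; the proofs are below) =====
def Claim_equal_sino_any_py : Prop := ∀ (num_str : String), Dom_sino_any_py num_str → Pre_sino_any_py num_str → Spec_sino_any_py num_str (sino_any_py num_str)

-- ===== LEMMAS AND PROOFS =====

-- proof-side vocabulary
def dig (d : Int) : String := PySem.List.pyGetD pvDigits d ""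
def sel (d : Int) (name : String) : List String :=
  if d ≠ 0 then [if d == 1 then name else dig d ++ " " ++ name] else []
-- canonical token list of one 4-digit chunk 0 ≤ x < 10000
def ctok (x : Int) : List String :=
  sel (x / 1000 % 10) "천" ++ sel (x / 100 % 10) "백" ++ sel (x / 10 % 10) "십" ++
  (if x % 10 ≠ 0 then [dig (x % 10)] else [])
def seg (v : Int) (name : String) : List String := if v ≠ 0 then ctok v ++ [name] else []
-- canonical token list of 0 ≤ n < 10^16
def itok (n : Int) : List String :=
  if n = 0 then ["영"] else
  seg (n / 10^12 % 10^4) "조" ++ seg (n / 10^8 % 10^4) "억" ++ seg (n / 10^4 % 10^4) "만" ++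
  (if n % 10^4 ≠ 0 then ctok (n % 10^4) else [])

-- a clean string: nonempty, no leading or trailing whitespace
def cleanB (cs : List Char) : Bool :=
  !cs.isEmpty && cs.head?.all (fun c => !PySem.Chars.isspace c)
    && cs.getLast?.all (fun c => !PySem.Chars.isspace c)

-- divmod bridges
theorem fdiv_c (a b : Int) (hb : 0 < b) : PySem.Int.floordiv a b = a / b := by
  simp only [PySem.Int.floordiv]; rw [Int.fdiv_eq_ediv]; simp [Int.le_of_lt hb]
theorem fmod_c (a b : Int) (hb : 0 < b) : PySem.Int.mod a b = a % b := by
  simp only [PySem.Int.mod]; rw [Int.fmod_eq_emod]; simp [Int.le_of_lt hb]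

-- (if c then l ++ [t] else l) = l ++ (if c then [t] else [])
theorem ite_app {α} (c : Prop) [Decidable c] (l : List α) (t : α) :
    (if c then l ++ [t] else l) = l ++ (if c then [t] else []) := by split <;> simp

-- clean facts
theorem clean_ne_nil {cs : List Char} (h : cleanB cs = true) : cs ≠ [] := by
  rcases cs with _ | _ <;> simp_all [cleanB]

theorem clean_mid {as bs ms : List Char} (ha : cleanB as = true) (hb : cleanB bs = true) :
    cleanB (as ++ ms ++ bs) = true := by
  have ha' := clean_ne_nil ha
  have hb' := clean_ne_nil hb
  simp only [cleanB, Bool.and_eq_true] at *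
  refine ⟨⟨?_, ?_⟩, ?_⟩
  · simp [ha']
  · rw [List.append_assoc, List.head?_append_of_ne_nil _ ha']; exact ha.1.2
  · rw [List.getLast?_append_of_ne_nil _ hb']; exact hb.2

theorem strip_clean {cs : List Char} (h : cleanB cs = true) : PySem.Chars.strip cs = cs := by
  obtain ⟨c, rest, rfl⟩ : ∃ c rest, cs = c :: rest := by
    rcases cs with _ | ⟨c, rest⟩; · exact absurd rfl (clean_ne_nil h)
    · exact ⟨c, rest, rfl⟩
  simp only [cleanB, Bool.and_eq_true, List.head?_cons, Option.all_some] at h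
  obtain ⟨⟨-, hh⟩, hl⟩ := h
  simp only [PySem.Chars.strip, PySem.Chars.lstrip, PySem.Chars.rstrip]
  rw [List.dropWhile_cons_of_neg (by simp_all)]
  obtain ⟨l, ds, hds⟩ : ∃ l ds, c :: rest = ds ++ [l] := by
    refine ⟨(c :: rest).getLast (by simp), (c :: rest).dropLast, ?_⟩
    exact (List.dropLast_append_getLast (by simp)).symm
  rw [hds] at hl ⊢
  rw [List.getLast?_append_of_ne_nil _ (by simp)] at hl
  simp only [List.getLast?_singleton, Option.all_some] at hl
  rw [List.reverse_append, List.reverse_singleton, List.singleton_append,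
    List.dropWhile_cons_of_neg (by simp_all)]
  simp

theorem rstrip_space (cs : List Char) : PySem.Chars.rstrip (cs ++ [' ']) = PySem.Chars.rstrip cs := by
  simp only [PySem.Chars.rstrip, List.reverse_append, List.reverse_singleton, List.singleton_append]
  rw [List.dropWhile_cons_of_pos (by decide)]
-- join lemmas (Chars level)
theorem cjoin_append (sep : List Char) : ∀ (xs ys : List (List Char)), xs ≠ [] → ys ≠ [] →
    PySem.Chars.join sep (xs ++ ys) = PySem.Chars.join sep xs ++ sep ++ PySem.Chars.join sep ys
  | [], _, hx, _ => absurd rfl hx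
  | [x], y :: ys, _, _ => by
      rw [List.singleton_append, PySem.Chars.join_cons_cons, PySem.Chars.join_singleton]
  | x1 :: x2 :: xs, y :: ys, _, hy => by
      have ih := cjoin_append sep (x2 :: xs) (y :: ys) (by simp) hy
      rw [show (x1 :: x2 :: xs ++ y :: ys : List (List Char)) = x1 :: x2 :: (xs ++ y :: ys) by simp,
        PySem.Chars.join_cons_cons,
        show (x2 :: (xs ++ y :: ys) : List (List Char)) = x2 :: xs ++ y :: ys by simp, ih,
        PySem.Chars.join_cons_cons]
      simp [List.append_assoc]

theorem cjoin_clean : ∀ (xs : List (List Char)), xs ≠ [] → (∀ cs ∈ xs, cleanB cs = true) →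
    cleanB (PySem.Chars.join [' '] xs) = true
  | [], hx, _ => absurd rfl hx
  | [x], _, h => by rw [PySem.Chars.join_singleton]; exact h x (by simp)
  | x1 :: x2 :: xs, _, h => by
      rw [PySem.Chars.join_cons_cons]
      have ih := cjoin_clean (x2 :: xs) (by simp) (fun cs hcs => h cs (by simp_all))
      exact clean_mid (h x1 (by simp)) ih

theorem cjoin_flatten : ∀ (segs : List (List (List Char))),
    PySem.Chars.join [' '] ((segs.filter (fun s => !s.isEmpty)).map (PySem.Chars.join [' '])) =
      PySem.Chars.join [' '] segs.flatten
  | [] => rfl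
  | s :: rest => by
      have ih := cjoin_flatten rest
      rcases s with _ | ⟨t, ts⟩
      · simpa using ih
      · rw [List.flatten_cons, List.filter_cons_of_pos (by simp)]
        by_cases hr : (rest.filter (fun s => !s.isEmpty)) = []
        · have hfl : rest.flatten = [] := by
            rw [List.flatten_eq_nil_iff]
            intro l hl
            have := List.filter_eq_nil_iff.mp hr l hl
            simpa using this
          rw [hr, hfl]
          simp [PySem.Chars.join_singleton]
        · have hfl : rest.flatten ≠ [] := by
            intro hc
            rcases List.ne_nil_iff_exists_cons.mp hr with ⟨a, as, ha⟩
            have hmem : a ∈ rest.filter (fun s => !s.isEmpty) := by rw [ha]; simp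
            have := List.mem_filter.mp hmem
            have : a = [] := List.flatten_eq_nil_iff.mp hc a this.1
            simp_all
          have h1 := cjoin_append [' '] [PySem.Chars.join [' '] (t :: ts)]
            ((rest.filter (fun s => !s.isEmpty)).map (PySem.Chars.join [' '])) (by simp)
            (fun hc => hr (by simpa using List.map_eq_nil_iff.mp hc))
          rw [List.singleton_append, PySem.Chars.join_singleton] at h1
          have h2 := cjoin_append [' '] (t :: ts) rest.flatten (by simp) hfl
          rw [List.map_cons, h1, ih, h2]
-- cleanliness of the token vocabulary
theorem dig_clean (d : Int) (h0 : 0 ≤ d) (h10 : d < 10) : cleanB (dig d).toList = true := by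
  interval_cases d <;> decide

theorem sel_clean (d : Int) (name : String) (h0 : 0 ≤ d) (h10 : d < 10)
    (hn : cleanB name.toList = true) : ∀ t ∈ sel d name, cleanB t.toList = true := by
  intro t ht
  unfold sel at ht
  split at ht
  · simp only [List.mem_singleton] at ht
    subst ht
    split
    · exact hn
    · simp only [String.toList_append]
      exact clean_mid (dig_clean d h0 h10) hn
  · simp at ht

theorem sel_eq_nil_iff (d : Int) (name : String) : sel d name = [] ↔ d = 0 := by
  unfold sel; split <;> simp_all

theorem ctok_clean (x : Int) (h0 : 0 ≤ x) : ∀ t ∈ ctok x, cleanB t.toList = true := by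
  intro t ht
  unfold ctok at ht
  simp only [List.mem_append] at ht
  rcases ht with ((h | h) | h) | h
  · exact sel_clean _ _ (by omega) (by omega) (by decide) t h
  · exact sel_clean _ _ (by omega) (by omega) (by decide) t h
  · exact sel_clean _ _ (by omega) (by omega) (by decide) t h
  · split at h
    · simp only [List.mem_singleton] at h; subst h; exact dig_clean _ (by omega) (by omega)
    · simp at h

theorem ctok_ne_nil (x : Int) (h0 : 0 ≤ x) (h4 : x < 10000) (hx : x ≠ 0) : ctok x ≠ [] := by
  unfold ctok
  intro hc
  simp only [List.append_eq_nil_iff] at hc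
  obtain ⟨⟨⟨h3, h2⟩, h1⟩, hu⟩ := hc
  rw [sel_eq_nil_iff] at h3 h2 h1
  have hu' : x % 10 = 0 := by by_contra hne; simp [hne] at hu
  omega

theorem ctok_zero : ctok 0 = [] := by decide

theorem seg_clean (v : Int) (name : String) (h0 : 0 ≤ v) (hn : cleanB name.toList = true) :
    ∀ t ∈ seg v name, cleanB t.toList = true := by
  intro t ht
  unfold seg at ht
  split at ht
  · simp only [List.mem_append, List.mem_singleton] at ht
    rcases ht with h | rfl
    · exact ctok_clean v h0 t h
    · exact hn
  · simp at ht

theorem itok_clean (n : Int) (h0 : 0 ≤ n) : ∀ t ∈ itok n, cleanB t.toList = true := by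
  intro t ht
  unfold itok at ht
  split at ht
  · simp only [List.mem_singleton] at ht; subst ht; decide
  · simp only [List.mem_append] at ht
    rcases ht with ((h | h) | h) | h
    · exact seg_clean _ _ (by omega) (by decide) t h
    · exact seg_clean _ _ (by omega) (by decide) t h
    · exact seg_clean _ _ (by omega) (by decide) t h
    · split at h
      · exact ctok_clean _ (by omega) t h
      · simp at h

theorem itok_ne_nil (n : Int) (h0 : 0 ≤ n) (hlt : n < 10^16) : itok n ≠ [] := by
  unfold itok
  split
  · simp
  · intro hc
    simp only [List.append_eq_nil_iff] at hc
    obtain ⟨⟨⟨h3, h2⟩, h1⟩, hu⟩ := hc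
    unfold seg at h3 h2 h1
    have e3 : n / 10^12 % 10^4 = 0 := by by_contra hne; rw [if_pos hne] at h3; simp at h3
    have e2 : n / 10^8 % 10^4 = 0 := by by_contra hne; rw [if_pos hne] at h2; simp at h2
    have e1 : n / 10^4 % 10^4 = 0 := by by_contra hne; rw [if_pos hne] at h1; simp at h1
    have e0 : n % 10^4 = 0 := by
      by_contra hne
      rw [if_pos hne] at hu
      exact ctok_ne_nil (n % 10^4) (by omega) (by omega) hne hu
    omega
-- Str-level join corollaries
theorem sjoin_append (xs ys : List String) (hx : xs ≠ []) (hy : ys ≠ []) :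
    PySem.Str.join " " (xs ++ ys) = PySem.Str.join " " xs ++ " " ++ PySem.Str.join " " ys := by
  rw [← String.toList_inj]
  simp only [PySem.Str.toList_join, String.toList_append, List.map_append]
  exact cjoin_append _ _ _ (by simp [hx]) (by simp [hy])

theorem sjoin_clean (xs : List String) (hx : xs ≠ []) (h : ∀ t ∈ xs, cleanB t.toList = true) :
    cleanB (PySem.Str.join " " xs).toList = true := by
  rw [PySem.Str.toList_join]
  exact cjoin_clean _ (by simp [hx]) (by simpa using h)

theorem sstrip_clean (s : String) (h : cleanB s.toList = true) : PySem.Str.strip s = s := by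
  rw [← String.toList_inj, PySem.Str.toList_strip, strip_clean h]

-- A's chunk = canonical tokens
theorem chunk_eq (x : Int) (h0 : 0 ≤ x) (h4 : x < 10000) :
    chunkToSino x = PySem.Str.join " " (ctok x) := by
  by_cases hx : x = 0
  · subst hx; rw [ctok_zero]; rfl
  · unfold chunkToSino
    rw [if_neg (by simpa using hx)]
    simp only [pvSinoSmall, List.foldl_cons, List.foldl_nil]
    simp only [fdiv_c _ _ (by norm_num : (0:Int) < 1000), fmod_c _ _ (by norm_num : (0:Int) < 1000),
      fdiv_c _ _ (by norm_num : (0:Int) < 100), fmod_c _ _ (by norm_num : (0:Int) < 100),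
      fdiv_c _ _ (by norm_num : (0:Int) < 10), fmod_c _ _ (by norm_num : (0:Int) < 10)]
    simp only [ite_app, List.append_assoc, List.nil_append]
    rw [(by omega : x % 1000 / 100 = x / 100 % 10), (by omega : x % 1000 % 100 / 10 = x / 10 % 10),
      (by omega : x % 1000 % 100 % 10 = x % 10), (by omega : x / 1000 = x / 1000 % 10)]
    have hstrip := sstrip_clean _ (sjoin_clean _ (ctok_ne_nil x h0 h4 hx) (ctok_clean x h0))
    rw [← hstrip]
    congr 2
    simp only [ctok, sel, dig]
    split_ifs <;> simp
theorem sjoin_singleton (t : String) : PySem.Str.join " " [t] = t := by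
  rw [← String.toList_inj, PySem.Str.toList_join, List.map_singleton, PySem.Chars.join_singleton]

def outFold (segs : List (List String)) : List String :=
  segs.foldr (fun s acc => (if s ≠ [] then [PySem.Str.join " " s] else []) ++ acc) []

theorem outFold_nil_iff : ∀ segs : List (List String), outFold segs = [] ↔ segs.flatten = []
  | [] => by simp [outFold]
  | s :: rest => by
      have ih := outFold_nil_iff rest
      by_cases hs : s = [] <;> simp_all [outFold]

theorem sjoin_flatten : ∀ (segs : List (List String)),
    PySem.Str.join " " (outFold segs) = PySem.Str.join " " segs.flatten
  | [] => rfl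
  | s :: rest => by
      have ih := sjoin_flatten rest
      by_cases hs : s = []
      · subst hs
        simp only [outFold, List.foldr_cons] at *
        rw [if_neg (by simp)]
        simpa using ih
      · simp only [outFold, List.foldr_cons] at *
        rw [if_pos hs, List.flatten_cons]
        by_cases hr : rest.foldr (fun s acc => (if s ≠ [] then [PySem.Str.join " " s] else []) ++ acc) [] = []
        · have hfl : rest.flatten = [] := (outFold_nil_iff rest).mp hr
          rw [hr, hfl, List.append_nil, List.append_nil, sjoin_singleton]
        · have hfl : rest.flatten ≠ [] := fun hc => hr ((outFold_nil_iff rest).mpr hc)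
          rw [sjoin_append _ _ (by simp) hr, sjoin_singleton, ih, sjoin_append s rest.flatten hs hfl]

-- one segment of A's big loop, rewritten to joined canonical tokens
theorem seg_out (v : Int) (name : String) (h0 : 0 ≤ v) (h4 : v < 10000)
    (hn : cleanB name.toList = true) :
    (if v ≠ 0 then [PySem.Str.strip (chunkToSino v ++ " " ++ name)] else []) =
    (if seg v name ≠ [] then [PySem.Str.join " " (seg v name)] else []) := by
  by_cases hv : v = 0
  · rw [if_neg (by omega), if_neg (by simp [seg, hv])]
  · have hseg : seg v name = ctok v ++ [name] := by simp [seg, hv]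
    rw [if_pos hv, if_pos (by simp [hseg]), hseg,
      sjoin_append _ _ (ctok_ne_nil v h0 h4 hv) (by simp), sjoin_singleton, chunk_eq v h0 h4]
    exact congrArg (fun z => [z]) (sstrip_clean _ (by
      simp only [String.toList_append]
      exact clean_mid (sjoin_clean _ (ctok_ne_nil v h0 h4 hv) (ctok_clean v h0)) hn))

def useg (v : Int) : List String := if v ≠ 0 then ctok v else []

theorem useg_out (v : Int) (h0 : 0 ≤ v) (h4 : v < 10000) :
    (if v ≠ 0 then [chunkToSino v] else []) =
    (if useg v ≠ [] then [PySem.Str.join " " (useg v)] else []) := by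
  by_cases hv : v = 0
  · rw [if_neg (by omega), if_neg (by simp [useg, hv])]
  · simp only [useg]
    rw [if_pos hv, if_pos hv, if_pos (by simpa using ctok_ne_nil v h0 h4 hv), chunk_eq v h0 h4]
theorem sinoIntA (n : Int) (h0 : 0 ≤ n) (hlt : n < 10 ^ 16) :
    sinoInt n = PySem.Str.join " " (itok n) := by
  by_cases hn : n = 0
  · subst hn; rw [show itok 0 = ["영"] from rfl, sjoin_singleton]; rfl
  · unfold sinoInt
    rw [if_neg (by simpa using hn)]
    simp only [pvSinoBig, List.foldl_cons, List.foldl_nil]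
    simp only [fdiv_c _ _ (by norm_num : (0:Int) < 10^12), fmod_c _ _ (by norm_num : (0:Int) < 10^12),
      fdiv_c _ _ (by norm_num : (0:Int) < 10^8), fmod_c _ _ (by norm_num : (0:Int) < 10^8),
      fdiv_c _ _ (by norm_num : (0:Int) < 10^4), fmod_c _ _ (by norm_num : (0:Int) < 10^4)]
    simp only [ite_app, List.nil_append]
    rw [(by omega : n % 10 ^ 12 / 10 ^ 8 = n / 10 ^ 8 % 10 ^ 4),
      (by omega : n % 10 ^ 12 % 10 ^ 8 / 10 ^ 4 = n / 10 ^ 4 % 10 ^ 4),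
      (by omega : n % 10 ^ 12 % 10 ^ 8 % 10 ^ 4 = n % 10 ^ 4),
      (by omega : n / 10 ^ 12 = n / 10 ^ 12 % 10 ^ 4)]
    rw [seg_out (n / 10 ^ 12 % 10 ^ 4) "조" (by omega) (by omega) (by decide),
      seg_out (n / 10 ^ 8 % 10 ^ 4) "억" (by omega) (by omega) (by decide),
      seg_out (n / 10 ^ 4 % 10 ^ 4) "만" (by omega) (by omega) (by decide),
      useg_out (n % 10 ^ 4) (by omega) (by omega)]
    have hout : (if seg (n / 10 ^ 12 % 10 ^ 4) "조" ≠ [] then [PySem.Str.join " " (seg (n / 10 ^ 12 % 10 ^ 4) "조")] else []) ++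
        (if seg (n / 10 ^ 8 % 10 ^ 4) "억" ≠ [] then [PySem.Str.join " " (seg (n / 10 ^ 8 % 10 ^ 4) "억")] else []) ++
        (if seg (n / 10 ^ 4 % 10 ^ 4) "만" ≠ [] then [PySem.Str.join " " (seg (n / 10 ^ 4 % 10 ^ 4) "만")] else []) ++
        (if useg (n % 10 ^ 4) ≠ [] then [PySem.Str.join " " (useg (n % 10 ^ 4))] else []) =
        outFold [seg (n / 10 ^ 12 % 10 ^ 4) "조", seg (n / 10 ^ 8 % 10 ^ 4) "억",
          seg (n / 10 ^ 4 % 10 ^ 4) "만", useg (n % 10 ^ 4)] := by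
      simp [outFold, List.append_assoc]
    rw [hout, sjoin_flatten]
    have hflat : ([seg (n / 10 ^ 12 % 10 ^ 4) "조", seg (n / 10 ^ 8 % 10 ^ 4) "억",
        seg (n / 10 ^ 4 % 10 ^ 4) "만", useg (n % 10 ^ 4)] : List (List String)).flatten = itok n := by
      simp only [List.flatten_cons, List.flatten_nil, List.append_nil, itok, useg, if_neg hn, List.append_assoc]
    rw [hflat]
    exact sstrip_clean _ (sjoin_clean _ (itok_ne_nil n h0 hlt) (itok_clean n h0))
-- ===== B side =====
def pvStepTok (d : Int) (p : String) : List String :=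
  if d == 1 && p != "" then [p]
  else if d != 0 then [PySem.List.pyGetD pvDigits d "" ++ (if p != "" then " " ++ p else "")]
  else []

theorem pvGroupStep_eq (m : Int) (acc : List String) (p : String) :
    pvGroupStep (m, acc) p = (PySem.Int.floordiv m 10, acc ++ pvStepTok (PySem.Int.mod m 10) p) := by
  simp only [pvGroupStep, pvStepTok]
  split_ifs <;> simp

theorem stepTok_named (d : Int) (p : String) (hp : p ≠ "") : pvStepTok d p = sel d p := by
  by_cases h1 : d = 1 <;> by_cases h0 : d = 0 <;>
    simp_all [pvStepTok, sel, dig, String.append_assoc]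

theorem stepTok_unit (d : Int) : pvStepTok d "" = if d ≠ 0 then [dig d] else [] := by
  by_cases h1 : d = 1 <;> by_cases h0 : d = 0 <;> simp_all [pvStepTok, dig]

theorem sel_reverse (d : Int) (name : String) : (sel d name).reverse = sel d name := by
  unfold sel; split <;> simp

theorem ctok_of_zero (v : Int) (h : v = 0) : ctok v = [] := by subst h; exact ctok_zero

theorem ctok_rev (m : Int) (h0 : 0 ≤ m) :
    (ctok (m % 10000)).reverse =
      (if m % 10 ≠ 0 then [dig (m % 10)] else []) ++ sel (m / 10 % 10) "십" ++
        sel (m / 100 % 10) "백" ++ sel (m / 1000 % 10) "천" := by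
  unfold ctok
  rw [(by omega : m % 10000 / 1000 % 10 = m / 1000 % 10),
    (by omega : m % 10000 / 100 % 10 = m / 100 % 10),
    (by omega : m % 10000 / 10 % 10 = m / 10 % 10),
    (by omega : m % 10000 % 10 = m % 10)]
  simp only [List.reverse_append, sel_reverse, List.append_assoc]
  split <;> simp

theorem group_fold' (m : Int) (h0 : 0 ≤ m) :
    List.foldl pvGroupStep (m, ([] : List String)) pvSmallNames =
      (m / 10000, (ctok (m % 10000)).reverse) := by
  simp only [pvSmallNames, List.foldl_cons, List.foldl_nil, pvGroupStep_eq]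
  simp only [fdiv_c _ _ (by norm_num : (0:Int) < 10), fmod_c _ _ (by norm_num : (0:Int) < 10)]
  rw [stepTok_unit,
    stepTok_named _ _ (by decide), stepTok_named _ _ (by decide), stepTok_named _ _ (by decide)]
  rw [(by omega : m / 10 / 10 % 10 = m / 100 % 10), (by omega : m / 10 / 10 / 10 % 10 = m / 1000 % 10),
    (by omega : m / 10 / 10 / 10 / 10 = m / 10000)]
  rw [ctok_rev m h0]
  simp [List.append_assoc, dig]

theorem loop_done (f : Nat) (g : Nat) (toks : List String) : pvGrpLoop f 0 g toks = toks := by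
  cases f <;> simp [pvGrpLoop]

theorem loop_step0 (f : Nat) (m : Int) (h0 : 0 ≤ m) (hm : m ≠ 0) (toks : List String) :
    pvGrpLoop (f + 1) m 0 toks = pvGrpLoop f (m / 10000) 1 (useg (m % 10000) ++ toks) := by
  simp only [pvGrpLoop]
  rw [if_neg (by simpa using hm), group_fold' m h0]
  simp only [List.reverse_reverse]
  by_cases hv : m % 10000 = 0
  · rw [if_neg (by simp [ctok_of_zero _ hv])]
    simp [useg, hv]
  · rw [if_pos (by simpa using ctok_ne_nil _ (by omega) (by omega) hv), if_neg (by omega)]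
    simp [useg, hv]

theorem loop_stepS (f : Nat) (m : Int) (h0 : 0 ≤ m) (hm : m ≠ 0) (g : Nat) (toks : List String)
    (name : String) (hname : PySem.List.pyGetD pvBigNames ((g + 1 : Nat) : Int) "" = name) :
    pvGrpLoop (f + 1) m (g + 1) toks =
      pvGrpLoop f (m / 10000) (g + 2) (seg (m % 10000) name ++ toks) := by
  simp only [pvGrpLoop]
  rw [if_neg (by simpa using hm), group_fold' m h0]
  simp only [List.reverse_reverse]
  by_cases hv : m % 10000 = 0
  · rw [if_neg (by simp [ctok_of_zero _ hv])]
    simp [seg, hv]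
  · rw [if_pos (by simpa using ctok_ne_nil _ (by omega) (by omega) hv), if_pos (by omega), hname]
    simp [seg, hv]
theorem tokensB_eq (n : Int) (h0 : 0 ≤ n) (hlt : n < 10 ^ 16) : sinoIntTokens n = itok n := by
  by_cases hn : n = 0
  · subst hn; rfl
  · unfold sinoIntTokens
    rw [if_neg (by omega), if_neg (by simpa using hn)]
    rw [show (17:Nat) = 16 + 1 from rfl, loop_step0 16 n h0 hn]
    by_cases h1 : n / 10000 = 0
    · rw [h1, loop_done]
      rw [(by omega : n % 10000 = n % 10 ^ 4)]
      have e1 : n / 10 ^ 4 % 10 ^ 4 = 0 := by omega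
      have e2 : n / 10 ^ 8 % 10 ^ 4 = 0 := by omega
      have e3 : n / 10 ^ 12 % 10 ^ 4 = 0 := by omega
      have b1 : (10000:Int) ∣ n / 10000 := by omega
      have b2 : (10000:Int) ∣ n / 100000000 := by omega
      have b3 : (10000:Int) ∣ n / 1000000000000 := by omega
      simp [itok, seg, useg, hn, b1, b2, b3]
    · rw [show (16:Nat) = 15 + 1 from rfl,
        loop_stepS 15 (n / 10000) (by omega) h1 0 _ "만" (by decide)]
      by_cases h2 : n / 10000 / 10000 = 0
      · rw [h2, loop_done]
        rw [(by omega : n % 10000 = n % 10 ^ 4),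
          (by omega : n / 10000 % 10000 = n / 10 ^ 4 % 10 ^ 4)]
        have e2 : n / 10 ^ 8 % 10 ^ 4 = 0 := by omega
        have e3 : n / 10 ^ 12 % 10 ^ 4 = 0 := by omega
        have b2 : (10000:Int) ∣ n / 100000000 := by omega
        have b3 : (10000:Int) ∣ n / 1000000000000 := by omega
        simp [itok, seg, useg, hn, b2, b3]
      · rw [show (15:Nat) = 14 + 1 from rfl,
          loop_stepS 14 (n / 10000 / 10000) (by omega) h2 1 _ "억" (by decide)]
        by_cases h3 : n / 10000 / 10000 / 10000 = 0
        · rw [h3, loop_done]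
          rw [(by omega : n % 10000 = n % 10 ^ 4),
            (by omega : n / 10000 % 10000 = n / 10 ^ 4 % 10 ^ 4),
            (by omega : n / 10000 / 10000 % 10000 = n / 10 ^ 8 % 10 ^ 4)]
          have e3 : n / 10 ^ 12 % 10 ^ 4 = 0 := by omega
          have b3 : (10000:Int) ∣ n / 1000000000000 := by omega
          simp [itok, seg, useg, hn, b3, List.append_assoc]
        · rw [show (14:Nat) = 13 + 1 from rfl,
            loop_stepS 13 (n / 10000 / 10000 / 10000) (by omega) h3 2 _ "조" (by decide)]
          rw [(by omega : n / 10000 / 10000 / 10000 / 10000 = 0), loop_done]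
          rw [(by omega : n % 10000 = n % 10 ^ 4),
            (by omega : n / 10000 % 10000 = n / 10 ^ 4 % 10 ^ 4),
            (by omega : n / 10000 / 10000 % 10000 = n / 10 ^ 8 % 10 ^ 4),
            (by omega : n / 10000 / 10000 / 10000 % 10000 = n / 10 ^ 12 % 10 ^ 4)]
          simp [itok, useg, hn, List.append_assoc]
theorem digit_char_cases (c : Char) (h : PySem.Chars.isdigit c = true) :
    c = '0' ∨ c = '1' ∨ c = '2' ∨ c = '3' ∨ c = '4' ∨ c = '5' ∨ c = '6' ∨ c = '7' ∨ c = '8' ∨ c = '9' := by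
  simp only [PySem.Chars.isdigit, Bool.and_eq_true, decide_eq_true_eq] at h
  obtain ⟨h1, h2⟩ := h
  rw [Char.le_def] at h1 h2
  have l1 : 48 ≤ c.toNat := h1
  have l2 : c.toNat ≤ 57 := h2
  have hc : c.toNat = 48 ∨ c.toNat = 49 ∨ c.toNat = 50 ∨ c.toNat = 51 ∨ c.toNat = 52 ∨ c.toNat = 53
      ∨ c.toNat = 54 ∨ c.toNat = 55 ∨ c.toNat = 56 ∨ c.toNat = 57 := by omega
  have ext : ∀ k : Char, c.toNat = k.toNat → c = k := by
    intro k hk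
    apply Char.ext
    exact UInt32.toNat_inj.mp hk
  rcases hc with h|h|h|h|h|h|h|h|h|h <;>
    [exact Or.inl (ext _ h); exact Or.inr (Or.inl (ext _ h));
     exact Or.inr (Or.inr (Or.inl (ext _ h)));
     exact Or.inr (Or.inr (Or.inr (Or.inl (ext _ h))));
     exact Or.inr (Or.inr (Or.inr (Or.inr (Or.inl (ext _ h)))));
     exact Or.inr (Or.inr (Or.inr (Or.inr (Or.inr (Or.inl (ext _ h))))));
     exact Or.inr (Or.inr (Or.inr (Or.inr (Or.inr (Or.inr (Or.inl (ext _ h)))))));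
     exact Or.inr (Or.inr (Or.inr (Or.inr (Or.inr (Or.inr (Or.inr (Or.inl (ext _ h))))))));
     exact Or.inr (Or.inr (Or.inr (Or.inr (Or.inr (Or.inr (Or.inr (Or.inr (Or.inl (ext _ h)))))))));
     exact Or.inr (Or.inr (Or.inr (Or.inr (Or.inr (Or.inr (Or.inr (Or.inr (Or.inr (ext _ h)))))))))]

theorem bclean (ch : Char) (h : PySem.Str.isdigit ch = true) :
    cleanB (PySem.List.pyGetD pvDigits ((PySem.Int.ofChars? [ch]).getD 0) "").toList = true := by
  have := digit_char_cases ch h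
  rcases this with rfl|rfl|rfl|rfl|rfl|rfl|rfl|rfl|rfl|rfl <;> decide

theorem sjoin_nil : PySem.Str.join " " ([] : List String) = "" := rfl

theorem lstrip_clean_append (cs ds : List Char) (h : cleanB cs = true) :
    PySem.Chars.lstrip (cs ++ ds) = cs ++ ds := by
  obtain ⟨c, rest, rfl⟩ : ∃ c rest, cs = c :: rest := by
    rcases cs with _ | ⟨c, rest⟩; · exact absurd rfl (clean_ne_nil h)
    · exact ⟨c, rest, rfl⟩
  simp only [cleanB, Bool.and_eq_true, List.head?_cons, Option.all_some] at h
  simp only [PySem.Chars.lstrip, List.cons_append]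
  rw [List.dropWhile_cons_of_neg (by simp_all)]

theorem rstrip_clean (cs : List Char) (h : cleanB cs = true) : PySem.Chars.rstrip cs = cs := by
  obtain ⟨l, ds, hds⟩ : ∃ l ds, cs = ds ++ [l] := by
    refine ⟨cs.getLast (clean_ne_nil h), cs.dropLast, ?_⟩
    exact (List.dropLast_append_getLast (clean_ne_nil h)).symm
  subst hds
  simp only [cleanB, Bool.and_eq_true] at h
  obtain ⟨-, hl⟩ := h
  rw [List.getLast?_append_of_ne_nil _ (by simp)] at hl
  simp only [List.getLast?_singleton, Option.all_some] at hl
  simp only [PySem.Chars.rstrip, List.reverse_append, List.reverse_singleton, List.singleton_append]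
  rw [List.dropWhile_cons_of_neg (by simp_all)]
  simp

theorem clean_append_tail (as ds : List Char) (ha : cleanB as = true) (hd : ds ≠ [])
    (hlast : ds.getLast?.all (fun c => !PySem.Chars.isspace c) = true) :
    cleanB (as ++ ds) = true := by
  have ha' := clean_ne_nil ha
  simp only [cleanB, Bool.and_eq_true] at *
  refine ⟨⟨by simp [ha'], ?_⟩, ?_⟩
  · rw [List.head?_append_of_ne_nil _ ha']; exact ha.1.2
  · rw [List.getLast?_append_of_ne_nil _ hd]; exact hlast

theorem final_join (atoks btoks : List String) (ha : atoks ≠ [])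
    (hac : ∀ t ∈ atoks, cleanB t.toList = true) (hbc : ∀ t ∈ btoks, cleanB t.toList = true) :
    PySem.Str.strip (PySem.Str.join " " atoks ++ " 점 " ++ PySem.Str.join " " btoks) =
      PySem.Str.join " " (atoks ++ ["점"] ++ btoks) := by
  have hja := sjoin_clean atoks ha hac
  by_cases hb : btoks = []
  · subst hb
    rw [show (atoks ++ ["점"] ++ [] : List String) = atoks ++ ["점"] by simp]
    rw [sjoin_append atoks ["점"] ha (by simp), sjoin_singleton, sjoin_nil]
    rw [← String.toList_inj, PySem.Str.toList_strip]
    simp only [String.toList_append]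
    rw [show ("" : String).toList = [] from rfl, List.append_nil]
    rw [show (" 점 " : String).toList = [' ', '점', ' '] from rfl]
    rw [show (" " : String).toList = [' '] from rfl, show ("점" : String).toList = ['점'] from rfl]
    rw [PySem.Chars.strip, lstrip_clean_append _ _ hja]
    rw [show ((PySem.Str.join " " atoks).toList ++ [' ', '점', ' ']) =
      ((PySem.Str.join " " atoks).toList ++ [' ', '점']) ++ [' '] by simp]
    rw [rstrip_space, rstrip_clean _ (clean_append_tail _ _ hja (by simp) (by decide))]
    simp
  · have hjb := sjoin_clean btoks hb hbc
    rw [show (atoks ++ ["점"] ++ btoks : List String) = (atoks ++ ["점"]) ++ btoks by simp]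
    rw [sjoin_append _ btoks (by simp) hb, sjoin_append atoks ["점"] ha (by simp), sjoin_singleton]
    rw [← String.toList_inj, PySem.Str.toList_strip]
    have : cleanB (PySem.Str.join " " atoks ++ " 점 " ++ PySem.Str.join " " btoks).toList = true := by
      simp only [String.toList_append]
      exact clean_mid hja hjb
    rw [strip_clean this]
    simp [String.toList_append]
theorem intRead (v : Int) (h0 : 0 ≤ v) (hlt : v < 10 ^ 16) :
    sinoInt v = PySem.Str.join " " (sinoIntTokens v) := by
  rw [sinoIntA v h0 hlt, tokensB_eq v h0 hlt]

-- ===== VERDICT (by name: the statement is the Claim_ definition above) =====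
theorem sino_any_py_spec : Claim_equal_sino_any_py := by
  intro num_str _ hpre
  unfold Spec_sino_any_py sino_any_py sino_any_py_alt
  unfold Pre_sino_any_py at hpre
  dsimp only at hpre ⊢
  obtain ⟨hpd, hpi⟩ := hpre
  by_cases hdot : PySem.Str.isIn "."
      (if PySem.Str.startswith (PySem.Str.replace num_str "," "") "." = true then
        "0" ++ PySem.Str.replace num_str "," "" else PySem.Str.replace num_str "," "") = true
  · rw [if_pos hdot, if_pos hdot]
    have hpa := hpd hdot
    -- name the pieces
    generalize hbdef : (((PySem.Str.splitMax?
        (if PySem.Str.startswith (PySem.Str.replace num_str "," "") "." = true then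
          "0" ++ PySem.Str.replace num_str "," "" else PySem.Str.replace num_str "," "")
        "." 1).getD []).drop 1).headD "" = b
    generalize hadef : ((PySem.Str.splitMax?
        (if PySem.Str.startswith (PySem.Str.replace num_str "," "") "." = true then
          "0" ++ PySem.Str.replace num_str "," "" else PySem.Str.replace num_str "," "")
        "." 1).getD []).headD "" = a at hpa ⊢
    have hbtc : ∀ t ∈ (b.toList.filter PySem.Str.isdigit).map (fun ch =>
        PySem.List.pyGetD pvDigits ((PySem.Int.ofChars? [ch]).getD 0) ""), cleanB t.toList = true := by
      intro t ht
      obtain ⟨ch, hch, rfl⟩ := List.mem_map.mp ht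
      exact bclean ch (List.mem_filter.mp hch).2
    by_cases hA : a = ""
    · rw [if_neg (by simp [hA]), if_neg (by simp [hA])]
      rw [show ("영" : String) = PySem.Str.join " " ["영"] from (sjoin_singleton _).symm]
      exact final_join ["영"] _ (by simp) (by intro t ht; simp at ht; subst ht; decide) hbtc
    · rcases hpa with rfl | ⟨hsome, h0, hlt⟩
      · exact absurd rfl hA
      · rw [if_pos hA, if_pos hA]
        rw [intRead _ h0 hlt]
        refine final_join _ _ ?_ ?_ hbtc
        · rw [tokensB_eq _ h0 hlt]; exact itok_ne_nil _ h0 hlt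
        · rw [tokensB_eq _ h0 hlt]; exact itok_clean _ h0
  · rw [if_neg hdot, if_neg hdot]
    obtain ⟨hsome, h0, hlt⟩ := hpi (by simpa using hdot)
    exact intRead _ h0 hlt
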